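-- pv_equiv track=rewrite | github.com/skipnicky/Carleton-Computer-Science | COMP1405/Assignment 4/myqueue.py | multienqueue
-- ===== SOURCE A (Python) =====
-- def enqueue(queue, value):
--     #if length of queue less than maximum bound
--     if len(queue) < maxSize:
--         #add value to queue & return True
--         queue.append(value)
--         return True
--     #otherwise return False
--     else:
--         return False
--
-- def multienqueue(queue, items):
--     #set count to 0
--     count = 0
--     #for element in list of items
--     for i in items:
--         #add to queue
--         add = enqueue(queue,i)
--         #if add returns True (add was succesful)
--         if add == True:
--             #add one to count
--             count+=1
--         #otherwise pass
--         else: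
--             pass
--     #return number of items added
--     return(count)
--
-- maxSize = 10
-- ===== SOURCE B (Python) =====
-- maxSize = 10
--
-- def multienqueue(queue, items):
--     # closed-form slot count + bulk extend; same queue mutation as A
--     count = max(0, min(maxSize - len(queue), len(items)))
--     queue.extend(items[:count])
--     return count
-- ===== Notes on version B (the rewrite author's own statement) =====
-- stated objective: simpler
-- what changed: Replaced the per-element enqueue loop with a closed-form slot count max(0, min(maxSize - len(queue), len(items))) and one bulk slice extend.
import Mathlib
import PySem

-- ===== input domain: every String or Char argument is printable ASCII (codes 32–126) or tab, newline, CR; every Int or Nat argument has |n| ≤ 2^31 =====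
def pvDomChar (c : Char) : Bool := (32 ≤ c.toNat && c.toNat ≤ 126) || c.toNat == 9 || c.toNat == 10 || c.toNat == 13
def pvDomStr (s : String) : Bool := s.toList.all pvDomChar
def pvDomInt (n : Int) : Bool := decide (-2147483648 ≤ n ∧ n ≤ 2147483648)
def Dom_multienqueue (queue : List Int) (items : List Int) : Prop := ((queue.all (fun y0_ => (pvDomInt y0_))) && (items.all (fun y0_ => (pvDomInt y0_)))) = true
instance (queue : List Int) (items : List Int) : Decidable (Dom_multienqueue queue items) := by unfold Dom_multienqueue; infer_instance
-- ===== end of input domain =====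

-- B replaces A's per-element enqueue loop by a closed-form slot count plus one bulk
-- slice extend (objective: simpler). Both Pythons mutate `queue` identically; the
-- theorems here are about the RETURN value (the count of items added).

-- ===== PORT A =====
-- maxSize = 10
def pvMaxSize : Int := 10

-- enqueue: returns (new queue, success flag)
def pvEnqueue (queue : List Int) (value : Int) : List Int × Bool :=
  if (queue.length : Int) < pvMaxSize then (queue ++ [value], true) else (queue, false)

def multienqueue (queue : List Int) (items : List Int) : Int :=
  (items.foldl (fun (st : List Int × Int) i =>
    let r := pvEnqueue st.1 i
    if r.2 = true then (r.1, st.2 + 1) else (r.1, st.2)) (queue, 0)).2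

-- ===== PORT B =====
def multienqueue_alt (queue : List Int) (items : List Int) : Int :=
  max 0 (min (pvMaxSize - (queue.length : Int)) (items.length : Int))

-- ===== PRECONDITION & SPEC =====
def Spec_multienqueue (queue : List Int) (items : List Int) (out : Int) : Prop := out = multienqueue_alt queue items
instance (queue : List Int) (items : List Int) (out : Int) : Decidable (Spec_multienqueue queue items out) := by unfold Spec_multienqueue; infer_instance

-- ===== CLAIM (what is proved, stated in full; the proofs are below) =====
def Claim_equal_multienqueue : Prop := ∀ (queue : List Int) (items : List Int), Dom_multienqueue queue items → Spec_multienqueue queue items (multienqueue queue items)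

-- ===== LEMMAS AND PROOFS =====
theorem multienqueue_foldl (items queue : List Int) (c : Int) :
    (items.foldl (fun (st : List Int × Int) i =>
      let r := pvEnqueue st.1 i
      if r.2 = true then (r.1, st.2 + 1) else (r.1, st.2)) (queue, c)).2
    = c + max 0 (min (pvMaxSize - (queue.length : Int)) (items.length : Int)) := by
  induction items generalizing queue c with
  | nil => simp [pvMaxSize]
  | cons i rest ih =>
    rw [List.foldl_cons]
    by_cases h : (queue.length : Int) < pvMaxSize
    · have hstep : (let r := pvEnqueue (queue, c).1 i
          if r.2 = true then (r.1, (queue, c).2 + 1) else (r.1, (queue, c).2))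
          = ((queue ++ [i], c + 1) : List Int × Int) := by simp [pvEnqueue, h]
      rw [hstep, ih]
      simp only [List.length_append, List.length_cons, List.length_nil, pvMaxSize] at h ⊢
      push_cast
      omega
    · have hstep : (let r := pvEnqueue (queue, c).1 i
          if r.2 = true then (r.1, (queue, c).2 + 1) else (r.1, (queue, c).2))
          = ((queue, c) : List Int × Int) := by simp [pvEnqueue, h]
      rw [hstep, ih]
      simp only [List.length_cons, pvMaxSize] at h ⊢
      push_cast
      omega

-- ===== VERDICT (by name: the statement is the Claim_ definition above) =====
theorem multienqueue_spec : Claim_equal_multienqueue := by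
  intro queue items _
  unfold Spec_multienqueue multienqueue multienqueue_alt
  rw [multienqueue_foldl]
  omega
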